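-- pv_equiv track=rewrite | github.com/naturals-blr/naturals-blr.github.io | build.py | get_service_categories_with_icons
-- ===== SOURCE A (Python) =====
-- def get_field(obj, field, default=""):
--     """
--     Case-insensitive field access for dictionaries.
--     Tries exact match first, then case-insensitive match.
--     Returns default if field not found.
--
--     Examples:
--         get_field(store, "Store_ID") → works
--         get_field(store, "store_id") → works
--         get_field(store, "STORE_ID") → works
--         get_field(service, "Store_N78") → matches "store_n78"
--     """
--     if not isinstance(obj, dict):
--         return default
--
--     # Try exact match first (fastest)
--     if field in obj:
--         return obj[field]
--
--     # Try case-insensitive match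
--     field_lower = field.lower()
--     for key in obj.keys():
--         if key.lower() == field_lower:
--             return obj[key]
--
--     # Return default if not found
--     return default
--
-- def get_service_categories_with_icons(services):
--     """
--     Extract specific service categories with their icon names from services data.
--     Returns list of dicts: [{'name': 'Category Name', 'icon_name': 'filename.jpg'}]
--     """
--     target_categories = [
--         'HAIR STYLING - FEMALE',
--         'HAIR WASH AND BLOW DRY',
--         'COLOURING AND HIGHLIGHTS',
--         'TEXTURE',
--         'HAIR STYLING',
--         'HEAD MASSAGE'
--     ]
--
--     categories = {}
--
--     for service in services:
--         category = get_field(service, "Category", "").strip()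
--         icon_name = get_field(service, "service_icon_name", "").strip()
--
--         if category in target_categories and icon_name and icon_name != 'NA':
--             # Use the first icon found for each category
--             if category not in categories:
--                 categories[category] = {
--                     'name': category,
--                     'icon_name': icon_name,
--                     'href': 'services/'
--                 }
--
--     # Return categories in target order
--     result = []
--     for target_cat in target_categories:
--         if target_cat in categories:
--             result.append(categories[target_cat])
--         else:
--             # Fallback to default if category not found
--             result.append({
--                 'name': target_cat,
--                 'icon_name': 'service_default.jpg',
--                 'href': 'services/'
--             })
--
--     return result
-- ===== SOURCE B (Python) =====
-- def get_field(obj, field, default=""):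
--     if not isinstance(obj, dict):
--         return default
--     if field in obj:
--         return obj[field]
--     field_lower = field.lower()
--     for key in obj.keys():
--         if key.lower() == field_lower:
--             return obj[key]
--     return default
--
--
-- def get_service_categories_with_icons(services):
--     target_categories = [
--         'HAIR STYLING - FEMALE',
--         'HAIR WASH AND BLOW DRY',
--         'COLOURING AND HIGHLIGHTS',
--         'TEXTURE',
--         'HAIR STYLING',
--         'HEAD MASSAGE'
--     ]
--     return [
--         next(
--             ({'name': target_cat,
--               'icon_name': get_field(service, "service_icon_name", "").strip(),
--               'href': 'services/'}
--              for service in services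
--              if get_field(service, "Category", "").strip() == target_cat
--              and get_field(service, "service_icon_name", "").strip()
--              and get_field(service, "service_icon_name", "").strip() != 'NA'),
--             {'name': target_cat,
--              'icon_name': 'service_default.jpg',
--              'href': 'services/'})
--         for target_cat in target_categories
--     ]
-- ===== Notes on version B (the rewrite author's own statement) =====
-- stated objective: simpler
-- what changed: Replaced the dict-accumulating pass plus a second assembly loop with a single list comprehension over the six target categories, each taking the first matching service via next() with a default entry.
import Mathlib
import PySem

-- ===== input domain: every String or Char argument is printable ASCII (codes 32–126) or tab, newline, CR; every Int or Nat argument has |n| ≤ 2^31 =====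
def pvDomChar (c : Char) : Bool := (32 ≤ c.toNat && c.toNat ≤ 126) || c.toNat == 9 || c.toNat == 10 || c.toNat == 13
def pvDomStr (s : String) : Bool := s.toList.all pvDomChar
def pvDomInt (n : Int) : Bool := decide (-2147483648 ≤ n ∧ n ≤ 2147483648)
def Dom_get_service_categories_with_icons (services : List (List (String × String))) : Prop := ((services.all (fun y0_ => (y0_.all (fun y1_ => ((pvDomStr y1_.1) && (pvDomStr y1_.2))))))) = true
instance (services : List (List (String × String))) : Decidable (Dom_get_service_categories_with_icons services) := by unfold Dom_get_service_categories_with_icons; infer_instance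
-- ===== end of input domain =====

-- B replaces A's index-build-then-assemble (accumulator dict + second loop) with one
-- comprehension over the six target categories, taking the first matching service per
-- category; same return value (objective: simpler).

-- ===== PORT A =====
-- shared helper: Python get_field (a dict is an assoc list in insertion order; exact
-- lookup = first match, then case-insensitive first match over keys())
def pvGetField (obj : List (String × String)) (field : String) (default : String) : String :=
  match obj.find? (fun kv => kv.1 == field) with
  | some kv => kv.2
  | none =>
    match obj.find? (fun kv => PySem.Str.lower kv.1 == PySem.Str.lower field) with
    | some kv => kv.2
    | none => default

def pvTargets : List String :=
  ["HAIR STYLING - FEMALE", "HAIR WASH AND BLOW DRY", "COLOURING AND HIGHLIGHTS",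
   "TEXTURE", "HAIR STYLING", "HEAD MASSAGE"]

def pvStepA (cats : PySem.Dict String (List (String × String)))
    (service : List (String × String)) : PySem.Dict String (List (String × String)) :=
  let category := PySem.Str.strip (pvGetField service "Category" "")
  let icon_name := PySem.Str.strip (pvGetField service "service_icon_name" "")
  if pvTargets.contains category && !(icon_name == "") && !(icon_name == "NA") then
    if cats.contains category then cats
    else cats.insert category
      [("name", category), ("icon_name", icon_name), ("href", "services/")]
  else cats

def get_service_categories_with_icons (services : List (List (String × String))) :
    List (List (String × String)) :=
  let categories := services.foldl pvStepA PySem.Dict.empty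
  pvTargets.foldl (fun result target_cat =>
    match categories.get? target_cat with
    | some v => result ++ [v]
    | none => result ++
        [[("name", target_cat), ("icon_name", "service_default.jpg"), ("href", "services/")]])
    []

-- ===== PORT B =====
-- first matching entry for one target category (the generator inside next())
def pvFirstEntry (services : List (List (String × String))) (target_cat : String) :
    Option (List (String × String)) :=
  match services with
  | [] => none
  | service :: rest =>
    let icon := PySem.Str.strip (pvGetField service "service_icon_name" "")
    if PySem.Str.strip (pvGetField service "Category" "") == target_cat
        && !(icon == "") && !(icon == "NA") then
      some [("name", target_cat), ("icon_name", icon), ("href", "services/")]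
    else pvFirstEntry rest target_cat

def get_service_categories_with_icons_alt (services : List (List (String × String))) :
    List (List (String × String)) :=
  pvTargets.map (fun target_cat =>
    (pvFirstEntry services target_cat).getD
      [("name", target_cat), ("icon_name", "service_default.jpg"), ("href", "services/")])

-- ===== PRECONDITION & SPEC =====
def Spec_get_service_categories_with_icons (services : List (List (String × String))) (out : List (List (String × String))) : Prop := out = get_service_categories_with_icons_alt services
instance (services : List (List (String × String))) (out : List (List (String × String))) : Decidable (Spec_get_service_categories_with_icons services out) := by unfold Spec_get_service_categories_with_icons; infer_instance

-- ===== CLAIM (what is proved, stated in full; the proofs are below) =====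
def Claim_equal_get_service_categories_with_icons : Prop := ∀ (services : List (List (String × String))), Dom_get_service_categories_with_icons services → Spec_get_service_categories_with_icons services (get_service_categories_with_icons services)

-- ===== LEMMAS AND PROOFS =====

-- one unfolding step of B's generator
theorem pvFirstEntry_cons (s : List (String × String))
    (rest : List (List (String × String))) (t : String) :
    pvFirstEntry (s :: rest) t =
      if PySem.Str.strip (pvGetField s "Category" "") == t
          && !(PySem.Str.strip (pvGetField s "service_icon_name" "") == "")
          && !(PySem.Str.strip (pvGetField s "service_icon_name" "") == "NA") then
        some [("name", t),
              ("icon_name", PySem.Str.strip (pvGetField s "service_icon_name" "")),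
              ("href", "services/")]
      else pvFirstEntry rest t := rfl

-- A's accumulator lookup after the fold = any prior binding, else B's first match
theorem pvFold_get (t : String) (ht : t ∈ pvTargets) :
    ∀ (services : List (List (String × String)))
      (d : PySem.Dict String (List (String × String))),
      (services.foldl pvStepA d).get? t = (d.get? t).or (pvFirstEntry services t) := by
  intro services
  induction services with
  | nil => intro d; simp [pvFirstEntry]
  | cons s rest ih =>
    intro d
    rw [List.foldl_cons, ih, pvFirstEntry_cons]
    simp only [pvStepA]
    by_cases hc : PySem.Str.strip (pvGetField s "Category" "") = t
    · by_cases h1 : PySem.Str.strip (pvGetField s "service_icon_name" "") = ""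
      · simp [hc, h1]
      · by_cases h2 : PySem.Str.strip (pvGetField s "service_icon_name" "") = "NA"
        · simp [hc, h2]
        · rw [hc, PySem.Dict.contains_eq_isSome_get?]
          cases hdt : d.get? t with
          | some v => simp [hdt, ht, h1, h2]
          | none => simp [ht, h1, h2, PySem.Dict.get?_insert_self]
    · have hbc : (PySem.Str.strip (pvGetField s "Category" "") == t) = false := by
        simp [hc]
      rw [hbc]
      simp only [Bool.false_and, Bool.false_eq_true, if_false]
      split_ifs with h1 h2
      · rfl
      · rw [PySem.Dict.get?_insert_of_ne _ _ (fun h => hc h.symm)]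
      · rfl

-- A's assembly loop over the literal target list is a map
theorem pvAssembly (categories : PySem.Dict String (List (String × String))) :
    pvTargets.foldl (fun result target_cat =>
      match categories.get? target_cat with
      | some v => result ++ [v]
      | none => result ++
          [[("name", target_cat), ("icon_name", "service_default.jpg"), ("href", "services/")]])
      []
    = pvTargets.map (fun target_cat =>
        (categories.get? target_cat).getD
          [("name", target_cat), ("icon_name", "service_default.jpg"), ("href", "services/")]) := by
  simp only [pvTargets, List.foldl_cons, List.foldl_nil, List.map_cons, List.map_nil]
  cases categories.get? "HAIR STYLING - FEMALE" <;>
    cases categories.get? "HAIR WASH AND BLOW DRY" <;>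
    cases categories.get? "COLOURING AND HIGHLIGHTS" <;>
    cases categories.get? "TEXTURE" <;>
    cases categories.get? "HAIR STYLING" <;>
    cases categories.get? "HEAD MASSAGE" <;> simp

-- ===== VERDICT (by name: the statement is the Claim_ definition above) =====
theorem get_service_categories_with_icons_spec : Claim_equal_get_service_categories_with_icons := by
  intro services _
  unfold Spec_get_service_categories_with_icons
  unfold get_service_categories_with_icons get_service_categories_with_icons_alt
  rw [pvAssembly]
  apply List.map_congr_left
  intro t ht
  rw [pvFold_get t ht services PySem.Dict.empty]
  simp [PySem.Dict.get?_empty, Option.getD]
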